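-- pv_equiv track=rewrite | github.com/LleilaA13/Python-practice | exercise32/solution.py | es21
-- ===== SOURCE A (Python) =====
-- def es21(matrix):
--     matrix1 = [[] for i in range(len(matrix))]
--     for j in range(len(matrix[0])):
--         column = []
--         for i in range(len(matrix)):
--             column += [matrix[i][j]]
--         column.sort()
--         for i in range(len(matrix)):
--             matrix1[i] += [column[i]]
--     return matrix1
-- ===== SOURCE B (Python) =====
-- def es21(matrix):
--     n = len(matrix)
--     m = len(matrix[0])
--     flat = sorted([(j, row[j]) for row in matrix for j in range(m)], key=lambda p: p[1])
--     cols = [[] for _ in range(m)]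
--     for j, v in flat:
--         cols[j].append(v)
--     return [[col[i] for col in cols] for i in range(n)]
-- ===== Notes on version B (the rewrite author's own statement) =====
-- stated objective: alternative
-- what changed: Instead of A's per-column loops (extract column j by index, sort it, append entry i into row i, repeated for every column), B performs ONE global sort of all (column, value) pairs keyed by value and then a single stable distribution pass that drops each value into its column bucket, so no per-column sort exists at all; rows are then read off the buckets.
import Mathlib
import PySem

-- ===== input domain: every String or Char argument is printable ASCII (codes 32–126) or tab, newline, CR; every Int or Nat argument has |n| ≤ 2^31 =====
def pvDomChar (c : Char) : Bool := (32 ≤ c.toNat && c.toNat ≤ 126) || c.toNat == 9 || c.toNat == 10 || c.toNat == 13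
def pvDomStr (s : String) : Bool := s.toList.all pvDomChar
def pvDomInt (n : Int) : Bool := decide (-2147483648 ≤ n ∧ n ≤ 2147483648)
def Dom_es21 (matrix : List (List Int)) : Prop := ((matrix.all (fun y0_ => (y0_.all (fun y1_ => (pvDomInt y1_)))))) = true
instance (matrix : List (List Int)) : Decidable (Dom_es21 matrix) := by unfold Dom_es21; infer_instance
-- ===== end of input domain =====

-- B replaces A's per-column extract-and-sort loops by ONE global sort of all (column, value)
-- pairs keyed by value followed by a stable distribution pass into column buckets.

-- ===== PORT A =====
def es21 (matrix : List (List Int)) : List (List Int) :=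
  let matrix1 := (PySem.List.pyRange 0 (PySem.List.len matrix) 1).map (fun _ => ([] : List Int))
  List.foldl
    (fun matrix1 j =>
      let column := List.foldl
        (fun column i => column ++ [PySem.List.pyGetD (PySem.List.pyGetD matrix i []) j 0])
        [] (PySem.List.pyRange 0 (PySem.List.len matrix) 1)
      let column := PySem.List.sorted column (fun x => x) false
      List.foldl
        (fun m1 i => PySem.List.pySetD m1 i (PySem.List.pyGetD m1 i [] ++ [PySem.List.pyGetD column i 0]))
        matrix1 (PySem.List.pyRange 0 (PySem.List.len matrix) 1))
    matrix1
    (PySem.List.pyRange 0 (PySem.List.len (PySem.List.pyGetD matrix 0 [])) 1)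

-- ===== PORT B =====
def es21_alt (matrix : List (List Int)) : List (List Int) :=
  let n := PySem.List.len matrix
  let m := PySem.List.len (PySem.List.pyGetD matrix 0 [])
  let flat := PySem.List.sorted
    (matrix.flatMap (fun row => (PySem.List.pyRange 0 m 1).map (fun j => (j, PySem.List.pyGetD row j 0))))
    (fun p => p.2) false
  let cols0 := (PySem.List.pyRange 0 m 1).map (fun _ => ([] : List Int))
  let cols := flat.foldl
    (fun cs p => PySem.List.pySetD cs p.1 (PySem.List.pyGetD cs p.1 [] ++ [p.2])) cols0
  (PySem.List.pyRange 0 n 1).map (fun i => cols.map (fun col => PySem.List.pyGetD col i 0))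

-- ===== PRECONDITION & SPEC =====
-- A raises IndexError on an empty matrix (matrix[0]) and whenever some row is shorter than the
-- first row (matrix[i][j]); Pre_ excludes exactly those inputs.
def Pre_es21 (matrix : List (List Int)) : Prop :=
  matrix ≠ [] ∧ ∀ r ∈ matrix, (matrix.headD []).length ≤ r.length
instance (matrix : List (List Int)) : Decidable (Pre_es21 matrix) := by unfold Pre_es21; infer_instance

def pvWitness_es21 : List (List Int) := [[3, 1, 2], [0, 5, -1]]

def Spec_es21 (matrix : List (List Int)) (out : List (List Int)) : Prop := out = es21_alt matrix
instance (matrix : List (List Int)) (out : List (List Int)) : Decidable (Spec_es21 matrix out) := by unfold Spec_es21; infer_instance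

-- ===== CLAIM (what is proved, stated in full; the proofs are below) =====
def Claim_equal_es21 : Prop := ∀ (matrix : List (List Int)), Dom_es21 matrix → Pre_es21 matrix → Spec_es21 matrix (es21 matrix)

-- ===== LEMMAS AND PROOFS =====

-- column j of the matrix, and that column sorted
def colF (matrix : List (List Int)) (j : Nat) : List Int := matrix.map (fun r => r.getD j 0)
def scol (matrix : List (List Int)) (j : Nat) : List Int :=
  PySem.List.sorted (colF matrix j) (fun x => x) false
-- the common normal form of both ports on Pre_: row i lists entry i of each sorted column
def specMat (matrix : List (List Int)) : List (List Int) :=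
  (List.range matrix.length).map
    (fun i => (List.range (matrix.headD []).length).map (fun j => (scol matrix j).getD i 0))

theorem pySetD_append_length (pre ys : List (List Int)) (t v : List Int) :
    PySem.List.pySetD (pre ++ t :: ys) (pre.length : Int) v = pre ++ v :: ys := by
  simp [PySem.List.pySetD]

theorem pyGetD_append_length (pre ys : List (List Int)) (t : List Int) :
    PySem.List.pyGetD (pre ++ t :: ys) (pre.length : Int) [] = t := by
  rw [PySem.List.pyGetD_natCast]
  simp [List.getD]

theorem zipIdx_range' (n : Nat) : ∀ k, (List.range' k n).zipIdx k = (List.range' k n).map (fun i => (i, i)) := by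
  induction n with
  | zero => intro k; rfl
  | succ n ih => intro k; simp [List.range'_succ, ih]

theorem zipIdx_map (f : Nat → List Int) (l : List Nat) (k : Nat) :
    (l.map f).zipIdx k = (l.zipIdx k).map (fun p => (f p.1, p.2)) := by
  induction l generalizing k <;> simp_all

-- the in-place update loop 'for i in range(n): matrix1[i] += [column[i]]'
theorem updLoop (c : List Int) (todo : List (List Int)) : ∀ (done : List (List Int)),
    List.foldl
      (fun m1 i => PySem.List.pySetD m1 i (PySem.List.pyGetD m1 i [] ++ [PySem.List.pyGetD c i 0]))
      (done ++ todo)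
      (PySem.List.pyRange (done.length : Int) ((done.length : Int) + (todo.length : Int)) 1)
    = done ++ (todo.zipIdx done.length).map (fun p => p.1 ++ [c.getD p.2 0]) := by
  induction todo with
  | nil =>
    intro done
    have hb : ((done.length : Int) + (([] : List (List Int)).length : Int)) = (done.length : Int) := by simp
    rw [hb]
    rw [PySem.List.pyRange_one_eq_nil le_rfl]
    rfl
  | cons t ts ih =>
    intro done
    rw [PySem.List.pyRange_one_cons (by simp)]
    rw [List.foldl_cons, pyGetD_append_length, PySem.List.pyGetD_natCast, pySetD_append_length]
    have h1 : done ++ (t ++ [c.getD done.length 0]) :: ts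
        = (done ++ [t ++ [c.getD done.length 0]]) ++ ts := by simp
    have h2 : ((done.length : Int) + 1)
        = (((done ++ [t ++ [c.getD done.length 0]]).length : Int)) := by simp
    have h3 : ((done.length : Int) + ((t :: ts).length : Int))
        = ((done ++ [t ++ [c.getD done.length 0]]).length : Int) + (ts.length : Int) := by
      simp; omega
    rw [h1, h3, h2, ih]
    simp [List.zipIdx_cons]

-- the update loop, started at 0 on a full row list
theorem updRows (c : List Int) (rows : List (List Int)) :
    List.foldl
      (fun m1 i => PySem.List.pySetD m1 i (PySem.List.pyGetD m1 i [] ++ [PySem.List.pyGetD c i 0]))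
      rows (PySem.List.pyRange 0 (rows.length : Int) 1)
    = (rows.zipIdx 0).map (fun p => p.1 ++ [c.getD p.2 0]) := by
  have := updLoop c rows []
  simpa using this

-- the update loop on rows that are an image of range: a pointwise map
theorem updMapRange (c : List Int) (n : Nat) (f : Nat → List Int) :
    List.foldl
      (fun m1 i => PySem.List.pySetD m1 i (PySem.List.pyGetD m1 i [] ++ [PySem.List.pyGetD c i 0]))
      ((List.range n).map f) (PySem.List.pyRange 0 (n : Int) 1)
    = (List.range n).map (fun i => f i ++ [c.getD i 0]) := by
  have h := updRows c ((List.range n).map f)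
  rw [List.length_map, List.length_range] at h
  rw [h, zipIdx_map, List.range_eq_range', zipIdx_range', List.map_map, List.map_map]
  rfl

-- the inner loop builds column j
theorem columnEq (matrix : List (List Int)) (j : Nat) :
    List.foldl
      (fun column i => column ++ [PySem.List.pyGetD (PySem.List.pyGetD matrix i []) (j : Int) 0])
      [] (PySem.List.pyRange 0 (PySem.List.len matrix) 1)
    = colF matrix j := by
  rw [PySem.List.foldl_pyRange_zero_pyGetD matrix []
      (fun column r => column ++ [PySem.List.pyGetD r (j : Int) 0]) []]
  rw [PySem.List.foldl_append_singleton_eq_map]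
  simp [colF]

-- A's outer loop over the first J columns
theorem outerA (matrix : List (List Int)) (J : Nat) :
    List.foldl
      (fun matrix1 j =>
        List.foldl
          (fun m1 i => PySem.List.pySetD m1 i (PySem.List.pyGetD m1 i [] ++
            [PySem.List.pyGetD
              (PySem.List.sorted
                (List.foldl
                  (fun column i => column ++ [PySem.List.pyGetD (PySem.List.pyGetD matrix i []) j 0])
                  [] (PySem.List.pyRange 0 (PySem.List.len matrix) 1))
                (fun x => x) false) i 0]))
          matrix1 (PySem.List.pyRange 0 (PySem.List.len matrix) 1))
      ((PySem.List.pyRange 0 (PySem.List.len matrix) 1).map (fun _ => ([] : List Int)))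
      (PySem.List.pyRange 0 (J : Int) 1)
    = (List.range matrix.length).map
        (fun i => (List.range J).map (fun j => (scol matrix j).getD i 0)) := by
  induction J with
  | zero =>
    rw [PySem.List.pyRange_one_eq_nil (show ((0 : Nat) : Int) ≤ 0 by simp)]
    simp [PySem.List.len, PySem.List.pyRange_zero_nat, List.map_map, Function.comp_def, List.map_const']
  | succ J ih =>
    rw [show ((J + 1 : Nat) : Int) = (J : Int) + 1 by push_cast; rfl]
    rw [PySem.List.pyRange_one_succ_right (by positivity), List.foldl_append, ih, List.foldl_cons,
        List.foldl_nil, columnEq matrix J]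
    have hlen : PySem.List.len matrix = (matrix.length : Int) := by simp [PySem.List.len]
    rw [hlen, updMapRange]
    simp [List.range_succ, scol]

-- A on Pre_ computes specMat
theorem esA_eq (matrix : List (List Int)) (hpre : Pre_es21 matrix) :
    es21 matrix = specMat matrix := by
  obtain ⟨hne, _⟩ := hpre
  obtain ⟨r0, rest, rfl⟩ : ∃ r0 rest, matrix = r0 :: rest := by
    cases matrix with
    | nil => exact absurd rfl hne
    | cons a l => exact ⟨a, l, rfl⟩
  show List.foldl _ _ (PySem.List.pyRange 0 (PySem.List.len (PySem.List.pyGetD (r0 :: rest) 0 [])) 1) = _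
  rw [PySem.List.pyGetD_zero_cons]
  have hlen : PySem.List.len r0 = (r0.length : Int) := by simp [PySem.List.len]
  rw [hlen]
  exact outerA (r0 :: rest) r0.length

-- ===== B-side lemmas =====

-- the distribution loop 'for j, v in flat: cols[j].append(v)' is a per-bucket filter
theorem bucketLoop : ∀ (l : List (Int × Int)) (cols : List (List Int)),
    (∀ p ∈ l, 0 ≤ p.1 ∧ p.1 < (cols.length : Int)) →
    l.foldl (fun cs p => PySem.List.pySetD cs p.1 (PySem.List.pyGetD cs p.1 [] ++ [p.2])) cols
    = (List.range cols.length).map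
        (fun j => cols.getD j [] ++ (l.filter (fun p => p.1 == ((j : Nat) : Int))).map (·.2)) := by
  intro l
  induction l with
  | nil =>
    intro cols _
    simp only [List.foldl_nil, List.filter_nil, List.map_nil, List.append_nil]
    refine (List.ext_getElem (by simp) ?_).symm
    intro k h1 h2
    simp only [List.getElem_map, List.getElem_range]
    exact List.getD_eq_getElem _ _ (by simpa using h2)
  | cons p l ih =>
    intro cols hb
    obtain ⟨h0, hlt⟩ := hb p (List.mem_cons_self ..)
    have hcast : p.1 = ((p.1.toNat : Nat) : Int) := (Int.toNat_of_nonneg h0).symm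
    have htlt : p.1.toNat < cols.length := by omega
    rw [List.foldl_cons,
        PySem.List.pyGetD_eq_getElem cols [] h0 hlt,
        PySem.List.pySetD_of_nonneg cols (cols[p.1.toNat] ++ [p.2]) h0]
    rw [ih _ (by
      intro q hq
      have := hb q (List.mem_cons_of_mem _ hq)
      simpa [List.length_set] using this)]
    apply List.ext_getElem (by simp)
    intro k hk1 hk2
    have hk : k < cols.length := by simpa using hk1
    simp only [List.getElem_map, List.getElem_range, List.length_set]
    rw [List.getD_eq_getElem _ _ (by simpa using hk), List.getD_eq_getElem _ _ hk,
        List.getElem_set, List.filter_cons]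
    by_cases htk : p.1.toNat = k
    · have hq : (p.1 == ((k : Nat) : Int)) = true := by
        rw [hcast, htk]; simp
      rw [hq, if_pos htk]
      simp [htk]
    · have hq : (p.1 == ((k : Nat) : Int)) = false := by
        rw [hcast]
        simp only [beq_eq_false_iff_ne, ne_eq, Nat.cast_inj]
        exact htk
      rw [hq, if_neg htk]
      simp

-- the column-j bucket of the globally sorted pair list IS the sorted column j
theorem colBucket (matrix : List (List Int)) (m j : Nat) (hj : j < m) :
    ((PySem.List.sorted
        (matrix.flatMap (fun row => (List.range m).map (fun (j' : Nat) => ((j' : Int), row.getD j' 0))))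
        (fun p => p.2) false).filter (fun p => p.1 == ((j : Nat) : Int))).map (·.2)
    = scol matrix j := by
  have hrow : ∀ row : List Int,
      ((List.range m).map (fun (j' : Nat) => ((j' : Int), row.getD j' 0))).filter
          (fun p => p.1 == ((j : Nat) : Int))
        = [((j : Int), row.getD j 0)] := by
    intro row
    rw [List.filter_map]
    have hf : ((List.range m).filter ((fun p => p.1 == ((j : Nat) : Int)) ∘
          (fun (j' : Nat) => ((j' : Int), row.getD j' 0))))
        = (List.range m).filter (· == j) := by
      apply List.filter_congr
      intro x _
      simp [Function.comp]
    rw [hf, List.filter_beq, List.count_range, if_pos hj]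
    simp
  have hfilter : ∀ rows : List (List Int),
      (rows.flatMap (fun row => (List.range m).map (fun (j' : Nat) => ((j' : Int), row.getD j' 0)))).filter
          (fun p => p.1 == ((j : Nat) : Int))
        = rows.map (fun row => ((j : Int), row.getD j 0)) := by
    intro rows
    induction rows with
    | nil => rfl
    | cons r rs ihr => simp only [List.flatMap_cons, List.filter_append, hrow, ihr, List.map_cons]; rfl
  have hperm : (((PySem.List.sorted
        (matrix.flatMap (fun row => (List.range m).map (fun (j' : Nat) => ((j' : Int), row.getD j' 0))))
        (fun p => p.2) false).filter (fun p => p.1 == ((j : Nat) : Int))).map (·.2)).Perm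
      (colF matrix j) := by
    refine (((PySem.List.sorted_perm _ _ false).filter _).map _).trans ?_
    rw [hfilter, List.map_map]
    exact List.Perm.refl _
  have hpw : (((PySem.List.sorted
        (matrix.flatMap (fun row => (List.range m).map (fun (j' : Nat) => ((j' : Int), row.getD j' 0))))
        (fun p => p.2) false).filter (fun p => p.1 == ((j : Nat) : Int))).map (·.2)).Pairwise (· ≤ ·) := by
    rw [List.pairwise_map]
    exact (PySem.List.sorted_pairwise _ _).filter _
  exact (PySem.List.sorted_id_eq_of_perm_of_pairwise _ _ hperm hpw).symm

-- B computes specMat (unconditionally)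
theorem esB_eq (matrix : List (List Int)) :
    es21_alt matrix = specMat matrix := by
  unfold es21_alt
  have hhead : PySem.List.pyGetD matrix 0 ([] : List Int) = matrix.headD [] := by
    rw [PySem.List.pyGetD_zero]; cases matrix <;> rfl
  have hlenM : PySem.List.len (matrix.headD []) = ((matrix.headD []).length : Int) := by
    simp [PySem.List.len]
  have hlen : PySem.List.len matrix = (matrix.length : Int) := by simp [PySem.List.len]
  simp only [hhead, hlenM, hlen, PySem.List.pyRange_zero_nat]
  have hentries : matrix.flatMap (fun row => ((List.range (matrix.headD []).length).map
        (fun k => ((k : Nat) : Int))).map (fun j => (j, PySem.List.pyGetD row j 0)))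
      = matrix.flatMap (fun row => (List.range (matrix.headD []).length).map
        (fun (j' : Nat) => ((j' : Int), row.getD j' 0))) := by
    simp [List.map_map, Function.comp_def]
  rw [hentries]
  have hconst : ((List.range (matrix.headD []).length).map
      (fun k => ((k : Nat) : Int))).map (fun _ => ([] : List Int))
      = (List.range (matrix.headD []).length).map (fun _ => ([] : List Int)) := by
    simp [List.map_map, Function.comp_def]
  rw [hconst]
  have hbound : ∀ p ∈ PySem.List.sorted
      (matrix.flatMap (fun row => (List.range (matrix.headD []).length).map
        (fun (j' : Nat) => ((j' : Int), row.getD j' 0))))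
      (fun p => p.2) false,
      0 ≤ p.1 ∧ p.1 < ((((List.range (matrix.headD []).length).map
        (fun _ => ([] : List Int))).length : Nat) : Int) := by
    intro p hp
    rw [PySem.List.mem_sorted] at hp
    obtain ⟨row, _, hp2⟩ := List.mem_flatMap.mp hp
    obtain ⟨j', hj', rfl⟩ := List.mem_map.mp hp2
    have : j' < (matrix.headD []).length := List.mem_range.mp hj'
    constructor
    · exact Int.natCast_nonneg j'
    · simp only [List.length_map, List.length_range]
      exact_mod_cast this
  rw [bucketLoop _ _ hbound]
  have hcols0 : ∀ jj : Nat, (((List.range (matrix.headD []).length).map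
      (fun _ => ([] : List Int))).getD jj []) = [] := by
    intro jj
    rcases Nat.lt_or_ge jj (matrix.headD []).length with h | h
    · rw [List.getD_eq_getElem _ _ (by simpa using h)]; simp
    · rw [List.getD_eq_default _ _ (by simpa using h)]
  have hcols : (List.range (((List.range (matrix.headD []).length).map
        (fun _ => ([] : List Int))).length)).map
      (fun j => (((List.range (matrix.headD []).length).map (fun _ => ([] : List Int))).getD j [])
        ++ ((PySem.List.sorted
          (matrix.flatMap (fun row => (List.range (matrix.headD []).length).map
            (fun (j' : Nat) => ((j' : Int), row.getD j' 0))))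
          (fun p => p.2) false).filter (fun p => p.1 == ((j : Nat) : Int))).map (·.2))
      = (List.range (matrix.headD []).length).map (fun j => scol matrix j) := by
    simp only [List.length_map, List.length_range]
    apply List.map_congr_left
    intro j hj
    rw [hcols0 j, List.nil_append, colBucket matrix _ j (List.mem_range.mp hj)]
  rw [hcols]
  unfold specMat
  simp [List.map_map, Function.comp_def]
-- ===== VERDICT (by name: the statement is the Claim_ definition above) =====
theorem es21_spec : Claim_equal_es21 := by
  intro matrix _ hpre
  unfold Spec_es21
  rw [esA_eq matrix hpre, esB_eq matrix]
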